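-- pv_equiv track=rewrite | github.com/hosseinbio/python-learning-projects | projects/bioinformatics_projects/motif_finder/src/motif_finder.py | find_motif_blocks
-- ===== SOURCE A (Python) =====
-- def find_motif_blocks(seq: str, motif: str):
--     """
--     Finds repeated blocks of motif (e.g. GC repeated 4x).
--     Returns list of dicts: {start, end, length, repeats}
--     """
--     blocks = []
--     i = 0
--     m = len(motif)
--
--     while i < len(seq):
--         if seq[i:i + m] == motif:
--             start = i
--
--             while seq[i:i + m] == motif:
--                 i += m
--
--             end = i  # 1-based friendly
--             block_len = end - start
--             repeats = block_len // m
--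
--             blocks.append({
--                 "start": start + 1,
--                 "end": end,
--                 "length": block_len,
--                 "repeats": repeats
--             })
--         else:
--             i += 1
--
--     return blocks
-- ===== SOURCE B (Python) =====
-- def find_motif_blocks(seq: str, motif: str):
--     """Locate all motif occurrences once with str.find, then group the
--     aligned consecutive ones into blocks in a single pass."""
--     m = len(motif)
--     occs = []
--     p = seq.find(motif)
--     while p != -1:
--         occs.append(p)
--         p = seq.find(motif, p + 1)
--     occ_set = set(occs)
--     blocks = []
--     end = 0
--     for pos in occs:
--         if pos < end:
--             continue
--         start = pos
--         end = start
--         while end in occ_set: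
--             end += m
--         blocks.append({"start": start + 1, "end": end,
--                        "length": end - start, "repeats": (end - start) // m})
--     return blocks
-- ===== Notes on version B (the rewrite author's own statement) =====
-- stated objective: faster
-- what changed: Instead of A's per-position slice-and-compare scan with a nested consume loop, B collects all motif occurrence positions once via str.find, then groups aligned consecutive occurrences into blocks in one pass over that (much shorter) list using a set for alignment tests.
-- outside the precondition, e.g. on find_motif_blocks('', ''): A returns [], B does not finish within the time limit
import Mathlib
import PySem

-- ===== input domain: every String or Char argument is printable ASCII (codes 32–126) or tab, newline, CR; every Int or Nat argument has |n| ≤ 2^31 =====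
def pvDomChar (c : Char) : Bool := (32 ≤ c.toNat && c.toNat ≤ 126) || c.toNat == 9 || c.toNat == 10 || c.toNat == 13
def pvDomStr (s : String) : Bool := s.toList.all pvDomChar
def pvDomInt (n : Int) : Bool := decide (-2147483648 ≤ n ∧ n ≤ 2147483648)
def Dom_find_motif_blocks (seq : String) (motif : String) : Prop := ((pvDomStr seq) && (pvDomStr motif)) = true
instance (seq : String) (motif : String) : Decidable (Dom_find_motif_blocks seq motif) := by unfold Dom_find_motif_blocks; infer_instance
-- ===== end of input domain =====

-- B replaces A's per-position slice-and-compare scan by a one-pass grouping of the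
-- motif-occurrence positions collected once with str.find (measurably faster in Python).

-- ===== PORT A =====
-- the dict {"start": start+1, "end": end, "length": end-start, "repeats": (end-start)//m}
-- (shared helper: both Pythons build this exact dict literal)
def pvMkBlock (start e m : Nat) : List (String × Int) :=
  [("start", (start : Int) + 1), ("end", (e : Int)),
   ("length", (e : Int) - (start : Int)),
   ("repeats", PySem.Int.floordiv ((e : Int) - (start : Int)) (m : Int))]

-- seq[i:i+m] == motif  (i and i+m are ≥ 0, so the PySem slice is exact here)
def pvSliceEq (s mot : List Char) (i : Nat) : Bool :=
  PySem.List.slice s (some (i : Int)) (some ((i : Int) + (mot.length : Int))) == mot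

-- inner 'while seq[i:i+m] == motif: i += m' (fuel ≥ len(seq)+1-i suffices when motif ≠ "")
def pvAInner (s mot : List Char) : Nat → Nat → Nat
  | 0, i => i
  | f + 1, i => if pvSliceEq s mot i then pvAInner s mot f (i + mot.length) else i

-- outer 'while i < len(seq)' loop
def pvALoop (s mot : List Char) : Nat → Nat → List (List (String × Int))
  | 0, _ => []
  | f + 1, i =>
    if i < s.length then
      if pvSliceEq s mot i then
        pvMkBlock i (pvAInner s mot (f + 1) i) mot.length ::
          pvALoop s mot f (pvAInner s mot (f + 1) i)
      else pvALoop s mot f (i + 1)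
    else []

def find_motif_blocks (seq : String) (motif : String) : List (List (String × Int)) :=
  pvALoop seq.toList motif.toList (seq.toList.length + 1) 0

-- ===== PORT B =====
-- 'p = seq.find(motif); while p != -1: occs.append(p); p = seq.find(motif, p+1)'
def pvCollect (s mot : List Char) : Nat → Int → List Nat
  | 0, _ => []
  | f + 1, p =>
    if p = -1 then []
    else p.toNat :: pvCollect s mot f (PySem.Chars.findFrom s mot (p + 1) none)

-- 'while end in occ_set: end += m' (fuel ≥ len(seq)+1-e suffices when motif ≠ "")
def pvBExtend (occSet : List Nat) (m : Nat) : Nat → Nat → Nat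
  | 0, e => e
  | f + 1, e => if PySem.Set.contains occSet e then pvBExtend occSet m f (e + m) else e

-- loop body of 'for pos in occs' with state (blocks, end)
def pvBStep (occSet : List Nat) (m n : Nat)
    (acc : List (List (String × Int)) × Nat) (pos : Nat) :
    List (List (String × Int)) × Nat :=
  if pos < acc.2 then acc
  else
    (acc.1 ++ [pvMkBlock pos (pvBExtend occSet m (n + 1) pos) m],
     pvBExtend occSet m (n + 1) pos)

def find_motif_blocks_alt (seq : String) (motif : String) : List (List (String × Int)) :=
  let s := seq.toList
  let mot := motif.toList
  let occs := pvCollect s mot (s.length + 2) (PySem.Chars.find s mot)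
  let occSet : PySem.Set Nat := PySem.Set.ofList occs
  (occs.foldl (pvBStep occSet mot.length s.length) ([], 0)).1

-- ===== PRECONDITION & SPEC =====
-- Pre_ excludes motif = "": there Python A loops forever on every non-empty seq (and B on
-- every seq); the single input ("", ""), where A returns [] but B diverges, is excluded with it.
def Pre_find_motif_blocks (seq : String) (motif : String) : Prop := motif ≠ ""
instance (seq : String) (motif : String) : Decidable (Pre_find_motif_blocks seq motif) := by
  unfold Pre_find_motif_blocks; infer_instance

def pvWitness_find_motif_blocks : String × String := ("AGCGCGTTGC", "GC")

def Spec_find_motif_blocks (seq : String) (motif : String) (out : List (List (String × Int))) : Prop := out = find_motif_blocks_alt seq motif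
instance (seq : String) (motif : String) (out : List (List (String × Int))) : Decidable (Spec_find_motif_blocks seq motif out) := by unfold Spec_find_motif_blocks; infer_instance

-- ===== CLAIM (what is proved, stated in full; the proofs are below) =====
def Claim_equal_find_motif_blocks : Prop := ∀ (seq : String) (motif : String), Dom_find_motif_blocks seq motif → Pre_find_motif_blocks seq motif → Spec_find_motif_blocks seq motif (find_motif_blocks seq motif)

-- ===== LEMMAS AND PROOFS =====

-- 'motif occurs at position j'
def pvOccB (s mot : List Char) (j : Nat) : Bool := decide (mot <+: s.drop j)

-- the occurrence positions ≥ k, in increasing order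
def pvOccsFrom (s mot : List Char) (k : Nat) : List Nat :=
  (List.range' k (s.length - k)).filter (pvOccB s mot)

theorem pvSliceEq_eq (s mot : List Char) (i : Nat) :
    pvSliceEq s mot i = pvOccB s mot i := by
  unfold pvSliceEq pvOccB
  rw [PySem.List.slice_natCast_add]
  simp only [List.prefix_iff_eq_take]
  refine Bool.eq_iff_iff.mpr ?_
  rw [beq_iff_eq, decide_eq_true_eq]
  exact eq_comm

theorem pvOccB_le (s mot : List Char) (hm : mot ≠ []) (j : Nat)
    (h : pvOccB s mot j = true) : j + mot.length ≤ s.length := by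
  have hp : mot <+: s.drop j := of_decide_eq_true h
  have h1 := hp.length_le
  rw [List.length_drop] at h1
  have h2 : 0 < mot.length := List.length_pos_iff.mpr hm
  omega

theorem pvContains_eq (s mot : List Char) (hm : mot ≠ []) (j : Nat) :
    PySem.Set.contains (PySem.Set.ofList (pvOccsFrom s mot 0)) j = pvOccB s mot j := by
  have hmem : j ∈ PySem.Set.ofList (pvOccsFrom s mot 0) ↔ pvOccB s mot j = true := by
    rw [PySem.Set.mem_ofList]
    unfold pvOccsFrom
    simp only [List.mem_filter, List.mem_range'_1]
    constructor
    · rintro ⟨_, hb⟩; exact hb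
    · intro hb
      have h1 := pvOccB_le s mot hm j hb
      have h2 : 0 < mot.length := List.length_pos_iff.mpr hm
      exact ⟨⟨by omega, by omega⟩, hb⟩
  have hc : PySem.Set.contains (PySem.Set.ofList (pvOccsFrom s mot 0)) j
      = decide (j ∈ PySem.Set.ofList (pvOccsFrom s mot 0)) := by
    simp [PySem.Set.contains]
  rw [hc]
  cases hb : pvOccB s mot j
  · exact decide_eq_false (fun h => by rw [hmem, hb] at h; exact Bool.false_ne_true h)
  · exact decide_eq_true (hmem.mpr hb)

theorem pvOccsFrom_nil (s mot : List Char) (k : Nat) (hk : s.length ≤ k) :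
    pvOccsFrom s mot k = [] := by
  unfold pvOccsFrom
  rw [Nat.sub_eq_zero_of_le hk]
  rfl

theorem pvOccsFrom_step (s mot : List Char) (k : Nat) (hk : k < s.length) :
    pvOccsFrom s mot k
      = (if pvOccB s mot k then [k] else []) ++ pvOccsFrom s mot (k + 1) := by
  unfold pvOccsFrom
  rw [show s.length - k = (s.length - (k + 1)) + 1 by omega, List.range'_succ]
  cases hb : pvOccB s mot k <;> simp [hb]

theorem pvOccsFrom_split (s mot : List Char) :
    ∀ (d a b : Nat), b - a = d → a ≤ b → b ≤ s.length →
      pvOccsFrom s mot a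
        = (List.range' a (b - a)).filter (pvOccB s mot) ++ pvOccsFrom s mot b := by
  intro d
  induction d with
  | zero =>
    intro a b hd hab hbn
    have : a = b := by omega
    subst this
    simp
  | succ d IH =>
    intro a b hd hab hbn
    have ha : a < b := by omega
    rw [pvOccsFrom_step s mot a (by omega),
        show b - a = (b - (a + 1)) + 1 by omega, List.range'_succ,
        IH (a + 1) b (by omega) (by omega) hbn]
    cases hb : pvOccB s mot a <;> simp [hb]

theorem pvOccsFrom_cons (s mot : List Char) (q : Nat)
    (hq : pvOccB s mot q = true) (hqn : q < s.length) :
    ∀ (d k' : Nat), q - k' = d → k' ≤ q →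
      (∀ j, k' ≤ j → j < q → pvOccB s mot j = false) →
      pvOccsFrom s mot k' = q :: pvOccsFrom s mot (q + 1) := by
  intro d
  induction d with
  | zero =>
    intro k' hd hkq hmin
    have : k' = q := by omega
    subst this
    rw [pvOccsFrom_step s mot k' hqn, hq]
    rfl
  | succ d IH =>
    intro k' hd hkq hmin
    have hlt : k' < q := by omega
    rw [pvOccsFrom_step s mot k' (by omega), hmin k' le_rfl hlt]
    exact IH (k' + 1) (by omega) (by omega) (fun j h1 h2 => hmin j (by omega) h2)

theorem pvCollect_eq (s mot : List Char) (hm : mot ≠ []) :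
    ∀ (f k : Nat), k ≤ s.length → s.length + 1 ≤ f + k →
      pvCollect s mot f (PySem.Chars.findFrom s mot (k : Int) none) = pvOccsFrom s mot k := by
  intro f
  induction f with
  | zero => intro k hk hfuel; exfalso; omega
  | succ f IH =>
    intro k hk hfuel
    by_cases hr : PySem.Chars.findFrom s mot (k : Int) none = -1
    · rw [pvCollect, if_pos hr]
      have hni : ¬ mot <:+: s.drop k :=
        (PySem.Chars.findFrom_natCast_eq_neg_one_iff s mot k hk).mp hr
      symm
      unfold pvOccsFrom
      rw [List.filter_eq_nil_iff]
      intro j hj hb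
      rw [List.mem_range'_1] at hj
      have hp : mot <+: s.drop j := of_decide_eq_true hb
      have hp2 : mot <+: (s.drop k).drop (j - k) := by
        rw [List.drop_drop, show k + (j - k) = j by omega]
        exact hp
      exact hni (hp2.isInfix.trans (List.drop_suffix _ _).isInfix)
    · obtain ⟨hkr, hpre, hmin⟩ := PySem.Chars.findFrom_natCast_spec s mot k hk hr
      have hr0 : (0 : Int) ≤ PySem.Chars.findFrom s mot (k : Int) none :=
        le_trans (by exact_mod_cast Int.natCast_nonneg k) hkr
      have hkq : k ≤ (PySem.Chars.findFrom s mot (k : Int) none).toNat := by omega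
      have hoccq : pvOccB s mot (PySem.Chars.findFrom s mot (k : Int) none).toNat = true :=
        decide_eq_true hpre
      have hqn := pvOccB_le s mot hm _ hoccq
      have hmpos : 0 < mot.length := List.length_pos_iff.mpr hm
      rw [pvCollect, if_neg hr,
          show PySem.Chars.findFrom s mot (k : Int) none + 1
              = (((PySem.Chars.findFrom s mot (k : Int) none).toNat + 1 : Nat) : Int) by omega,
          IH _ (by omega) (by omega)]
      exact (pvOccsFrom_cons s mot _ hoccq (by omega) _ k rfl hkq
        (fun j h1 h2 => by
          cases hb : pvOccB s mot j
          · rfl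
          · exact absurd (of_decide_eq_true hb) (hmin j h1 h2))).symm

theorem pvAInner_of_false (s mot : List Char) (f i : Nat) (h : pvOccB s mot i = false) :
    pvAInner s mot f i = i := by
  cases f with
  | zero => rfl
  | succ f => rw [pvAInner, pvSliceEq_eq, h]; rfl

theorem pvOccB_false_of_big (s mot : List Char) (hm : mot ≠ []) (i : Nat)
    (hi : s.length < i) : pvOccB s mot i = false := by
  cases hb : pvOccB s mot i
  · rfl
  · have := pvOccB_le s mot hm i hb
    have : 0 < mot.length := List.length_pos_iff.mpr hm
    omega

theorem pvExtend_eq (s mot : List Char) (hm : mot ≠ []) :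
    ∀ (f1 f2 i : Nat), s.length + 1 ≤ f1 + i → s.length + 1 ≤ f2 + i →
      pvAInner s mot f1 i
        = pvBExtend (PySem.Set.ofList (pvOccsFrom s mot 0)) mot.length f2 i := by
  intro f1
  induction f1 with
  | zero =>
    intro f2 i h1 h2
    have hb := pvOccB_false_of_big s mot hm i (by omega)
    cases f2 with
    | zero => rfl
    | succ f2 => rw [pvAInner, pvBExtend, pvContains_eq s mot hm, hb]; rfl
  | succ f1 IH =>
    intro f2 i h1 h2
    cases f2 with
    | zero =>
      have hb := pvOccB_false_of_big s mot hm i (by omega)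
      rw [pvAInner, pvSliceEq_eq, hb, pvBExtend]; rfl
    | succ f2 =>
      cases hb : pvOccB s mot i
      · rw [pvAInner, pvBExtend, pvSliceEq_eq, pvContains_eq s mot hm, hb]
        rfl
      · have hle := pvOccB_le s mot hm i hb
        have hmpos : 0 < mot.length := List.length_pos_iff.mpr hm
        simp only [pvAInner, pvBExtend, pvSliceEq_eq, pvContains_eq s mot hm, hb, if_true]
        exact IH f2 (i + mot.length) (by omega) (by omega)

theorem pvAInner_bounds (s mot : List Char) (hm : mot ≠ []) :
    ∀ (f i : Nat), s.length + 1 ≤ f + i → pvOccB s mot i = true →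
      i + mot.length ≤ pvAInner s mot f i ∧ pvAInner s mot f i ≤ s.length := by
  intro f
  induction f with
  | zero =>
    intro i h1 hb
    have := pvOccB_le s mot hm i hb
    have : 0 < mot.length := List.length_pos_iff.mpr hm
    exfalso; omega
  | succ f IH =>
    intro i h1 hb
    have hle := pvOccB_le s mot hm i hb
    have hmpos : 0 < mot.length := List.length_pos_iff.mpr hm
    rw [pvAInner, pvSliceEq_eq, hb, if_pos rfl]
    cases hb2 : pvOccB s mot (i + mot.length)
    · rw [pvAInner_of_false s mot f _ hb2]
      exact ⟨le_rfl, hle⟩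
    · have := IH (i + mot.length) (by omega) hb2
      exact ⟨by omega, this.2⟩

theorem pvFold_skip (occSet : List Nat) (m n : Nat) :
    ∀ (l : List Nat) (acc : List (List (String × Int))) (e : Nat),
      (∀ x ∈ l, x < e) → l.foldl (pvBStep occSet m n) (acc, e) = (acc, e) := by
  intro l
  induction l with
  | nil => intro acc e _; rfl
  | cons x l IH =>
    intro acc e h
    rw [List.foldl_cons, show pvBStep occSet m n (acc, e) x = (acc, e) by
      unfold pvBStep; rw [if_pos (h x (List.mem_cons_self))]]
    exact IH acc e (fun y hy => h y (List.mem_cons_of_mem x hy))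

theorem pvFold_append (occSet : List Nat) (m n : Nat) :
    ∀ (l : List Nat) (acc : List (List (String × Int))) (e : Nat),
      (l.foldl (pvBStep occSet m n) (acc, e)).1
        = acc ++ (l.foldl (pvBStep occSet m n) ([], e)).1 := by
  intro l
  induction l with
  | nil => intro acc e; simp
  | cons x l IH =>
    intro acc e
    rw [List.foldl_cons, List.foldl_cons]
    by_cases hx : x < e
    · rw [show pvBStep occSet m n (acc, e) x = (acc, e) by unfold pvBStep; rw [if_pos hx],
          show pvBStep occSet m n (([] : List (List (String × Int))), e) x = ([], e) by
            unfold pvBStep; rw [if_pos hx]]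
      exact IH acc e
    · rw [show pvBStep occSet m n (acc, e) x
            = (acc ++ [pvMkBlock x (pvBExtend occSet m (n + 1) x) m],
               pvBExtend occSet m (n + 1) x) by unfold pvBStep; rw [if_neg hx],
          show pvBStep occSet m n (([] : List (List (String × Int))), e) x
            = ([pvMkBlock x (pvBExtend occSet m (n + 1) x) m],
               pvBExtend occSet m (n + 1) x) by unfold pvBStep; rw [if_neg hx]; rfl]
      rw [IH (acc ++ [pvMkBlock x (pvBExtend occSet m (n + 1) x) m]) _,
          IH [pvMkBlock x (pvBExtend occSet m (n + 1) x) m] _]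
      simp

theorem pvMain (s mot : List Char) (hm : mot ≠ []) :
    ∀ (f i e0 : Nat), e0 ≤ i → s.length + 1 ≤ f + i →
      pvALoop s mot f i
        = ((pvOccsFrom s mot i).foldl
            (pvBStep (PySem.Set.ofList (pvOccsFrom s mot 0)) mot.length s.length)
            ([], e0)).1 := by
  intro f
  induction f with
  | zero =>
    intro i e0 he hfuel
    rw [pvALoop, pvOccsFrom_nil s mot i (by omega)]
    rfl
  | succ f IH =>
    intro i e0 he hfuel
    by_cases hi : i < s.length
    · rw [pvALoop, if_pos hi, pvSliceEq_eq]
      cases hb : pvOccB s mot i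
      · rw [if_neg (by simp), pvOccsFrom_step s mot i hi, hb]
        exact IH (i + 1) e0 (by omega) (by omega)
      · rw [if_pos rfl]
        have hbnd := pvAInner_bounds s mot hm (f + 1) i (by omega) hb
        have hmpos : 0 < mot.length := List.length_pos_iff.mpr hm
        set e := pvAInner s mot (f + 1) i with hedef
        rw [pvOccsFrom_step s mot i hi, hb]
        rw [if_pos rfl, List.singleton_append, List.foldl_cons]
        rw [show pvBStep (PySem.Set.ofList (pvOccsFrom s mot 0)) mot.length s.length
              (([] : List (List (String × Int))), e0) i
            = ([pvMkBlock i e mot.length], e) by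
          unfold pvBStep
          rw [if_neg (by omega),
              ← pvExtend_eq s mot hm (f + 1) (s.length + 1) i (by omega) (by omega), ← hedef]
          rfl]
        rw [pvOccsFrom_split s mot (e - (i + 1)) (i + 1) e rfl (by omega) (by omega),
            List.foldl_append,
            pvFold_skip _ _ _ _ _ e (fun x hx => by
              rw [List.mem_filter, List.mem_range'_1] at hx
              omega),
            pvFold_append]
        rw [IH e e le_rfl (by omega)]
        rfl
    · rw [pvALoop, if_neg hi, pvOccsFrom_nil s mot i (by omega)]
      rfl

-- ===== VERDICT (by name: the statement is the Claim_ definition above) =====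
theorem find_motif_blocks_spec : Claim_equal_find_motif_blocks := by
  unfold Claim_equal_find_motif_blocks
  intro seq motif _ hpre
  unfold Spec_find_motif_blocks find_motif_blocks find_motif_blocks_alt
  have hm : motif.toList ≠ [] := by
    unfold Pre_find_motif_blocks at hpre
    simp [hpre]
  have hocc : pvCollect seq.toList motif.toList (seq.toList.length + 2)
      (PySem.Chars.find seq.toList motif.toList) = pvOccsFrom seq.toList motif.toList 0 := by
    rw [show PySem.Chars.find seq.toList motif.toList
          = PySem.Chars.findFrom seq.toList motif.toList ((0 : Nat) : Int) none by
        rw [show (((0 : Nat) : Int)) = (0 : Int) by rfl, PySem.Chars.findFrom_zero]]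
    exact pvCollect_eq seq.toList motif.toList hm _ 0 (by omega) (by omega)
  simp only [hocc]
  exact pvMain seq.toList motif.toList hm (seq.toList.length + 1) 0 0 le_rfl (by omega)
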